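-- pv_equiv track=rewrite | github.com/yjaiswal007/Calendar | calendar.py | fill_month
-- ===== SOURCE A (Python) =====
-- def check_leap_year(year):
--     if year % 4 == 0:
--         if year % 100 == 0:
--             if year % 400 == 0:
--                 return True
--             else:
--                 return False
--         else:
--             return True
--     else:
--         return False
--
-- def fill_month(year):
--     months = [[] for _ in range(7)]  # initialize
--
--     ref_year, ref = 2000, 6  # starting day --> 6
--
--     # estimate shifting needed
--     if year > ref_year:
--         delta = year - ref_year - 1
--         shift = 2 + (delta*1 + (delta//4) - (delta//100) + (delta//400))%7
--     elif year < ref_year: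
--         delta = ref_year - year
--         shift = 7 - ((delta*1 + (delta//4) - (delta//100) + (delta//400))%7)
--     else:
--         shift = 0
--
--     ref = (ref + shift) % 7
--
--     month_list = ['Jan', 'Feb', 'Mar', 'Apr', 'May', 'Jun',
--                   'Jul', 'Aug', 'Sep', 'Oct', 'Nov', 'Dec']
--
--     month_dict = {'Jan': 31, 'Feb': 28, 'Mar': 31, 'Apr': 30,
--                   'May': 31, 'Jun': 30, 'Jul': 31, 'Aug': 31,
--                   'Sep': 30, 'Oct': 31, 'Nov': 30, 'Dec': 31}
--
--     # identify position of every month based on year and shifts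
--     for mnt in month_list:
--         months[ref].append(mnt)
--
--         if mnt == 'Feb':
--             if check_leap_year(year):
--                 ref = (ref + 1 + month_dict[mnt]) % 7
--         else:
--             ref = (ref + month_dict[mnt]) % 7
--
--     return months
-- ===== SOURCE B (Python) =====
-- def check_leap_year(year):
--     if year % 4 == 0:
--         if year % 100 == 0:
--             if year % 400 == 0:
--                 return True
--             else:
--                 return False
--         else:
--             return True
--     else:
--         return False
--
-- def fill_month(year):
--     # January's weekday index: same closed form as the original
--     ref_year, ref = 2000, 6
--     if year > ref_year:
--         delta = year - ref_year - 1
--         shift = 2 + (delta*1 + (delta//4) - (delta//100) + (delta//400))%7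
--     elif year < ref_year:
--         delta = ref_year - year
--         shift = 7 - ((delta*1 + (delta//4) - (delta//100) + (delta//400))%7)
--     else:
--         shift = 0
--     jan_ref = (ref + shift) % 7
--
--     names = ['Jan', 'Feb', 'Mar', 'Apr', 'May', 'Jun',
--              'Jul', 'Aug', 'Sep', 'Oct', 'Nov', 'Dec']
--     lengths = [31, 28, 31, 30, 31, 30, 31, 31, 30, 31, 30, 31]
--
--     # cumulative day offset of each month's first day from Jan 1
--     cum = [0]
--     for ln in lengths[:-1]:
--         cum.append(cum[-1] + ln)
--     leap = check_leap_year(year)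
--
--     months = [[] for _ in range(7)]
--     for i, name in enumerate(names):
--         off = cum[i] + (1 if leap and i >= 2 else 0)
--         months[(jan_ref + off) % 7].append(name)
--     return months
-- ===== Notes on version B (the rewrite author's own statement) =====
-- stated objective: alternative
-- what changed: B keeps the closed-form January weekday but replaces A's running-weekday accumulator (threading ref through the month loop with a dict of month lengths) by a precomputed cumulative-offset prefix table, with the leap day added to offsets from March on, placing each month's bucket directly via (jan_ref + cum[i]) % 7.
import Mathlib
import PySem

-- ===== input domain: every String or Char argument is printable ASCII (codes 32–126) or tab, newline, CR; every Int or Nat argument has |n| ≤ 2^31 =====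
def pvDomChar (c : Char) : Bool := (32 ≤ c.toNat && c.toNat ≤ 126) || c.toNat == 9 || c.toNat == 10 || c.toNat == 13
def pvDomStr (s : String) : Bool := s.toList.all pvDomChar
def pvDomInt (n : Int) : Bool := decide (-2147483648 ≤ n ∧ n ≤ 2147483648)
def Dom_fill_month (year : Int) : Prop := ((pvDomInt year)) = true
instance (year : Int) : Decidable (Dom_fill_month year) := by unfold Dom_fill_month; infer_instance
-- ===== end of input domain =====

-- B replaces A's running-weekday accumulator with a precomputed cumulative-offset
-- table (leap day added to offsets from March on), placing each month's bucket
-- directly; objective: alternative decomposition, same cost.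


-- ===== PORT A =====
def check_leap_year (year : Int) : Bool :=
  if PySem.Int.mod year 4 = 0 then
    if PySem.Int.mod year 100 = 0 then
      if PySem.Int.mod year 400 = 0 then true else false
    else true
  else false

-- January's weekday index: both Python sources carry this identical closed form
-- (ref_year = 2000, ref = 6, the shift estimate), so it is one shared helper.
def janRef (year : Int) : Int :=
  let shift : Int :=
    if year > 2000 then
      let delta := year - 2000 - 1
      2 + PySem.Int.mod (delta * 1 + PySem.Int.floordiv delta 4 - PySem.Int.floordiv delta 100 + PySem.Int.floordiv delta 400) 7
    else if year < 2000 then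
      let delta := 2000 - year
      7 - PySem.Int.mod (delta * 1 + PySem.Int.floordiv delta 4 - PySem.Int.floordiv delta 100 + PySem.Int.floordiv delta 400) 7
    else 0
  PySem.Int.mod (6 + shift) 7

def monthNames : List String :=
  ["Jan", "Feb", "Mar", "Apr", "May", "Jun", "Jul", "Aug", "Sep", "Oct", "Nov", "Dec"]

def fillA_monthDict : PySem.Dict String Int :=
  PySem.Dict.ofList [("Jan", 31), ("Feb", 28), ("Mar", 31), ("Apr", 30),
                     ("May", 31), ("Jun", 30), ("Jul", 31), ("Aug", 31),
                     ("Sep", 30), ("Oct", 31), ("Nov", 30), ("Dec", 31)]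

-- months[ref].append(mnt); ref is always in [0,7), so .toNat indexing is exact
def fillA_loop (year : Int) : List String → List (List String) → Int → List (List String)
  | [], months, _ => months
  | mnt :: rest, months, ref =>
    let months' := months.set ref.toNat ((months.getD ref.toNat []) ++ [mnt])
    let ref' :=
      if mnt = "Feb" then
        -- month_dict[mnt] never misses (all 12 keys present), so getD is exact
        if check_leap_year year then PySem.Int.mod (ref + 1 + fillA_monthDict.getD mnt 0) 7
        else ref
      else PySem.Int.mod (ref + fillA_monthDict.getD mnt 0) 7
    fillA_loop year rest months' ref'

def fill_month (year : Int) : List (List String) :=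
  fillA_loop year monthNames [[], [], [], [], [], [], []] (janRef year)

-- ===== PORT B =====
def fillB_lengths : List Int := [31, 28, 31, 30, 31, 30, 31, 31, 30, 31, 30, 31]

-- cum = [0]; for ln in lengths[:-1]: cum.append(cum[-1] + ln)
def fillB_cum : List Int :=
  fillB_lengths.dropLast.foldl (fun c ln => c ++ [c.getLastD 0 + ln]) [0]

def fill_month_alt (year : Int) : List (List String) :=
  let jan := janRef year
  let leap := check_leap_year year
  (PySem.List.enumerate monthNames).foldl
    (fun months p =>
      let off := PySem.List.pyGetD fillB_cum p.1 0 + (if leap && decide (p.1 ≥ 2) then 1 else 0)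
      -- bucket index is a %7 value, in [0,7): .toNat indexing is exact
      let idx := (PySem.Int.mod (jan + off) 7).toNat
      months.set idx ((months.getD idx []) ++ [p.2]))
    [[], [], [], [], [], [], []]

-- ===== PRECONDITION & SPEC =====
def Spec_fill_month (year : Int) (out : List (List String)) : Prop := out = fill_month_alt year
instance (year : Int) (out : List (List String)) : Decidable (Spec_fill_month year out) := by unfold Spec_fill_month; infer_instance

-- ===== CLAIM (what is proved, stated in full; the proofs are below) =====
def Claim_equal_fill_month : Prop := ∀ (year : Int), Dom_fill_month year → Spec_fill_month year (fill_month year)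

-- ===== LEMMAS AND PROOFS =====
lemma fillA_loop_congr (y1 y2 : Int) (h : check_leap_year y1 = check_leap_year y2) :
    ∀ (l : List String) (months : List (List String)) (ref : Int),
      fillA_loop y1 l months ref = fillA_loop y2 l months ref := by
  intro l
  induction l with
  | nil => intro months ref; rfl
  | cons mnt rest ih =>
    intro months ref
    simp only [fillA_loop, h]
    exact ih _ _

-- ===== VERDICT (by name: the statement is the Claim_ definition above) =====
theorem fill_month_spec : Claim_equal_fill_month := by
  intro year _
  show fill_month year = fill_month_alt year
  have h0 : 0 ≤ janRef year := PySem.Int.mod_nonneg _ (by norm_num)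
  have h7 : janRef year < 7 := PySem.Int.mod_lt _ (by norm_num)
  rw [fill_month]
  -- fix a representative year with the same leap flag, then chase the 7 January indices
  by_cases hb : check_leap_year year = true
  · rw [fillA_loop_congr year 2004 (by rw [hb]; decide)]
    simp only [fill_month_alt, hb]
    set j := janRef year with hj
    clear_value j
    interval_cases j <;> decide
  · have hb' : check_leap_year year = false := by simpa using hb
    rw [fillA_loop_congr year 2001 (by rw [hb']; decide)]
    simp only [fill_month_alt, hb']
    set j := janRef year with hj
    clear_value j
    interval_cases j <;> decide
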